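-- pv_equiv track=rewrite | github.com/modernfaust/Ryerson-CPS109-Labs | labs109.py | first_preceded_by_smaller
-- ===== SOURCE A (Python) =====
-- def first_preceded_by_smaller(items, k = 1):
--     for value in range (k,len(items)):
--         lessers  = 0
--         storage = items[:value]
--         for to_compare in storage:
--             if items[value] > to_compare:
--                 lessers +=1
--             if lessers == k:
--                 return items[value]
-- ===== SOURCE B (Python) =====
-- def bisect_left(a, x):
--     lo, hi = 0, len(a)
--     while lo < hi:
--         mid = (lo + hi) // 2
--         if a[mid] < x:
--             lo = mid + 1
--         else:
--             hi = mid
--     return lo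
--
-- def first_preceded_by_smaller(items, k = 1):
--     seen = []                       # sorted copy of the prefix scanned so far
--     for x in items:
--         lo = bisect_left(seen, x)   # = number of earlier elements smaller than x
--         if lo >= k:
--             return x
--         seen.insert(lo, x)
--     return None
-- ===== Notes on version B (the rewrite author's own statement) =====
-- stated objective: faster
-- what changed: Instead of re-scanning the whole prefix for every index, B maintains a sorted list of the elements seen so far and finds the number of smaller predecessors with a hand-written binary search (bisect_left), inserting each element at its sorted position.
-- intended difference: For k = 0 on a nonempty list whose first later element that is <= the head is not equal to the head itself (or is absent), A returns that element or None - an artefact of its 'lessers == k' check, which can only fire on the first comparison - while B returns the head, the first element preceded by at least 0 smaller elements, as intended. — e.g. on first_preceded_by_smaller([5], 0): A returns none, B returns some 5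
-- outside the precondition, e.g. on first_preceded_by_smaller([3, 1], -1): A returns None, B returns 3
import Mathlib
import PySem

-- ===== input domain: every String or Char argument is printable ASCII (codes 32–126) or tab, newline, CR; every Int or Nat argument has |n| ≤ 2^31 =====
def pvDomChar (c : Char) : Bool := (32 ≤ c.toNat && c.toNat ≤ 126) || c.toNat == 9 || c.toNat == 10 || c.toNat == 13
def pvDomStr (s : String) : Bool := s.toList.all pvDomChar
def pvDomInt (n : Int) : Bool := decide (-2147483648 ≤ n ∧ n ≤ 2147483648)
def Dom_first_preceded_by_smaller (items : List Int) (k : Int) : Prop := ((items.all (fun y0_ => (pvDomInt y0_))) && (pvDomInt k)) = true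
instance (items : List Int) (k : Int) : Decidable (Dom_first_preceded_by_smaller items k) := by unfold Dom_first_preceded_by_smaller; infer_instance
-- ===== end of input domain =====

-- B replaces A's per-index rescan of the whole prefix by a sorted list of the
-- elements seen so far plus a binary search (bisect_left); measurably faster.

-- ===== PORT A =====
-- inner loop: 'for to_compare in storage: …' with accumulator lessers, early return
def pvAInner (x k : Int) : List Int → Int → Option Int
  | [], _ => none
  | y :: ys, lessers =>
    let lessers' := if x > y then lessers + 1 else lessers
    if lessers' = k then some x else pvAInner x k ys lessers'

-- outer loop: 'for value in range(k, len(items)): …'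
def pvALoop (items : List Int) (k : Int) : List Int → Option Int
  | [] => none
  | v :: vs =>
    match PySem.List.pyGet? items v with
    | none => none     -- unreachable: items[value] is only evaluated when items[:value] is nonempty
    | some x =>
      match pvAInner x k (PySem.List.slice items none (some v)) 0 with
      | some r => some r
      | none => pvALoop items k vs

def first_preceded_by_smaller (items : List Int) (k : Int) : Option Int :=
  pvALoop items k (PySem.List.pyRange k (items.length : Int) 1)

-- ===== PORT B =====
-- Source B's hand-written bisect_left is exactly CPython's bisect_left loop = PySem.List.bisectLeft
def pvBLoop (k : Int) (seen : List Int) : List Int → Option Int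
  | [] => none
  | x :: xs =>
    let lo := PySem.List.bisectLeft seen x
    if k ≤ (lo : Int) then some x
    else pvBLoop k (PySem.List.insert seen (lo : Int) x) xs

def first_preceded_by_smaller_alt (items : List Int) (k : Int) : Option Int :=
  pvBLoop k [] items

-- ===== PRECONDITION & SPEC =====
-- Pre_ restricts to the natural domain of a required COUNT of smaller predecessors, k ≥ 0:
-- for negative k A's negative-range scan accidentally returns None where B naturally
-- returns the first element (one such excluded input is cited in claim.json).
def Pre_first_preceded_by_smaller (items : List Int) (k : Int) : Prop := 0 ≤ k
instance (items : List Int) (k : Int) : Decidable (Pre_first_preceded_by_smaller items k) := by unfold Pre_first_preceded_by_smaller; infer_instance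

def pvWitness_first_preceded_by_smaller : List Int × Int := ([2, 1, 3], 1)

-- For k = 0 on a nonempty list whose first later element that is ≤ the head is not equal to the
-- head itself (or is absent), A returns that element (or None) — an artefact of its 'lessers == k' check — while
-- B returns the head, the first element preceded by at least 0 smaller elements, as intended.
def D_first_preceded_by_smaller (items : List Int) (k : Int) : Prop :=
  k = 0 ∧ items ≠ [] ∧
    ¬ ∃ i < items.tail.length,
        items.tail.getD i 0 = items.headI ∧ ∀ j < i, items.headI < items.tail.getD j 0
instance (items : List Int) (k : Int) : Decidable (D_first_preceded_by_smaller items k) := by unfold D_first_preceded_by_smaller; infer_instance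

def Spec_first_preceded_by_smaller (items : List Int) (k : Int) (out : Option Int) : Prop := ¬ D_first_preceded_by_smaller items k → out = first_preceded_by_smaller_alt items k
instance (items : List Int) (k : Int) (out : Option Int) : Decidable (Spec_first_preceded_by_smaller items k out) := by unfold Spec_first_preceded_by_smaller; infer_instance

def pvDiffWitness_first_preceded_by_smaller : List Int × Int := ([5], 0)
def pvDiffWitnessOut_first_preceded_by_smaller : (Option Int) × (Option Int) := (none, some 5)

-- ===== CLAIM (what is proved, stated in full; the proofs are below) =====
def Claim_unchanged_first_preceded_by_smaller : Prop := ∀ (items : List Int) (k : Int), Dom_first_preceded_by_smaller items k → Pre_first_preceded_by_smaller items k → Spec_first_preceded_by_smaller items k (first_preceded_by_smaller items k)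
def Claim_exact_first_preceded_by_smaller : Prop := ∀ (items : List Int) (k : Int), Dom_first_preceded_by_smaller items k → Pre_first_preceded_by_smaller items k → D_first_preceded_by_smaller items k → first_preceded_by_smaller items k ≠ first_preceded_by_smaller_alt items k
def Claim_changed_first_preceded_by_smaller : Prop := Dom_first_preceded_by_smaller (pvDiffWitness_first_preceded_by_smaller.1) (pvDiffWitness_first_preceded_by_smaller.2) ∧ Pre_first_preceded_by_smaller (pvDiffWitness_first_preceded_by_smaller.1) (pvDiffWitness_first_preceded_by_smaller.2) ∧ D_first_preceded_by_smaller (pvDiffWitness_first_preceded_by_smaller.1) (pvDiffWitness_first_preceded_by_smaller.2) ∧ first_preceded_by_smaller (pvDiffWitness_first_preceded_by_smaller.1) (pvDiffWitness_first_preceded_by_smaller.2) = pvDiffWitnessOut_first_preceded_by_smaller.1 ∧ first_preceded_by_smaller_alt (pvDiffWitness_first_preceded_by_smaller.1) (pvDiffWitness_first_preceded_by_smaller.2) = pvDiffWitnessOut_first_preceded_by_smaller.2 ∧ pvDiffWitnessOut_first_preceded_by_smaller.1 ≠ pvDiffWitnessOut_first_preceded_by_smaller.2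

-- ===== LEMMAS AND PROOFS =====

-- reference loop both ports are reduced to: walk the list keeping the prefix,
-- return the current element as soon as countP (· < x) prefix ≥ k
def pvGo (k : Int) : List Int → List Int → Option Int
  | _, [] => none
  | pre, x :: xs =>
    if k ≤ (pre.countP (fun y => decide (y < x)) : Int) then some x
    else pvGo k (pre ++ [x]) xs

lemma pvAInner_eq (x k : Int) (l : List Int) (c : Int) (hc : c < k) :
    pvAInner x k l c =
      if k ≤ c + (l.countP (fun y => decide (y < x)) : Int) then some x else none := by
  induction l generalizing c with
  | nil => simp [pvAInner]; omega
  | cons y ys ih =>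
    simp only [pvAInner, List.countP_cons]
    by_cases hxy : x > y
    · have hy : decide (y < x) = true := by simp [hxy]
      by_cases hk : c + 1 = k
      · simp [hxy, hk]
        have : (ys.countP (fun y => decide (y < x)) : Int) ≥ 0 := by positivity
        omega
      · have : c + 1 < k := by omega
        simp [hxy, hk, ih _ this]
        have harr : ∀ n : Int, c + 1 + n = c + (n + 1) := by intro n; ring
        rw [harr]
    · have hy : decide (y < x) = false := by simp; omega
      have hk : ¬ (c = k) := by omega
      simp [hxy, hk, ih _ hc]

lemma pvALoop_eq (items : List Int) (k : Int) (hk : 0 < k) (i : Nat) :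
    pvALoop items k (PySem.List.pyRange (i : Int) (items.length : Int) 1) =
      pvGo k (items.take i) (items.drop i) := by
  by_cases hi : i < items.length
  · rw [PySem.List.pyRange_one_cons (by exact_mod_cast hi)]
    have hdrop : items.drop i = items[i] :: items.drop (i + 1) :=
      List.drop_eq_getElem_cons hi
    simp only [pvALoop, PySem.List.pyGet?_natCast, List.getElem?_eq_getElem hi,
      PySem.List.slice_to_natCast]
    rw [pvAInner_eq items[i] k (items.take i) 0 (by omega)]
    rw [hdrop]
    simp only [pvGo, zero_add]
    by_cases hcond : k ≤ ((items.take i).countP (fun y => decide (y < items[i])) : Int)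
    · simp [hcond]
    · simp only [hcond, if_false]
      have : ((i : Int) + 1) = ((i + 1 : Nat) : Int) := by push_cast; ring
      rw [this, pvALoop_eq items k hk (i + 1)]
      have htake : items.take (i + 1) = items.take i ++ [items[i]] := by
        rw [List.take_succ, List.getElem?_eq_getElem hi]; rfl
      rw [htake]
  · rw [PySem.List.pyRange_one_eq_nil (by exact_mod_cast Nat.le_of_not_lt hi)]
    rw [List.drop_eq_nil_of_le (Nat.le_of_not_lt hi)]
    rfl
termination_by items.length - i

lemma pvGo_skip (items : List Int) (k : Int) (hk : 0 < k) (i : Nat) (hi : i ≤ k.toNat) :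
    pvGo k (items.take i) (items.drop i) =
      pvGo k (items.take k.toNat) (items.drop k.toNat) := by
  by_cases he : i = k.toNat
  · rw [he]
  · have hlt : i < k.toNat := by omega
    by_cases hlen : i < items.length
    · have hdrop : items.drop i = items[i] :: items.drop (i + 1) :=
        List.drop_eq_getElem_cons hlen
      rw [hdrop]
      simp only [pvGo]
      have hcnt : ((items.take i).countP (fun y => decide (y < items[i]))) ≤ i := by
        calc (items.take i).countP _ ≤ (items.take i).length := List.countP_le_length
        _ ≤ i := by simp
      have hcond : ¬ k ≤ ((items.take i).countP (fun y => decide (y < items[i])) : Int) := by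
        have : (i : Int) < k := by omega
        omega
      rw [if_neg hcond]
      have htake : items.take i ++ [items[i]] = items.take (i + 1) := by
        rw [List.take_succ, List.getElem?_eq_getElem hlen]; rfl
      rw [htake, pvGo_skip items k hk (i + 1) (by omega)]
    · rw [List.drop_eq_nil_of_le (Nat.le_of_not_lt hlen),
        List.drop_eq_nil_of_le (by omega : items.length ≤ k.toNat)]
      rfl
termination_by k.toNat - i

lemma pvBisect_count (seen : List Int) (x : Int) (hs : seen.Pairwise (· ≤ ·)) :
    PySem.List.bisectLeft seen x = seen.countP (fun y => decide (y < x)) := by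
  obtain ⟨hle, hlo, hhi⟩ := PySem.List.bisectLeft_spec seen x hs
  set r := PySem.List.bisectLeft seen x with hr
  have hsplit : seen = seen.take r ++ seen.drop r := (List.take_append_drop r seen).symm
  conv_rhs => rw [hsplit]
  rw [List.countP_append]
  have h1 : (seen.take r).countP (fun y => decide (y < x)) = r := by
    have : ∀ a ∈ seen.take r, (fun y => decide (y < x)) a = true := by
      intro a ha
      obtain ⟨j, hj, hja⟩ := List.getElem_of_mem ha
      simp only [List.length_take, lt_min_iff] at hj
      have hjr : j < r := hj.1
      have hjlen : j < seen.length := hj.2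
      rw [List.getElem_take] at hja
      simpa [← hja] using hlo j hjlen hjr
    rw [List.countP_eq_length.mpr this, List.length_take]
    omega
  have h2 : (seen.drop r).countP (fun y => decide (y < x)) = 0 := by
    rw [List.countP_eq_zero]
    intro a ha
    obtain ⟨j, hj, hja⟩ := List.getElem_of_mem ha
    simp only [List.length_drop] at hj
    rw [List.getElem_drop] at hja
    have := hhi (r + j) (by omega) (by omega)
    simp [← hja]
    omega
  omega

lemma pvInsert_sorted (seen : List Int) (x : Int) (hs : seen.Pairwise (· ≤ ·)) :
    (seen.take (PySem.List.bisectLeft seen x) ++ x :: seen.drop (PySem.List.bisectLeft seen x)).Pairwise (· ≤ ·) := by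
  obtain ⟨hle, hlo, hhi⟩ := PySem.List.bisectLeft_spec seen x hs
  set r := PySem.List.bisectLeft seen x with hr
  have hmem_take : ∀ a ∈ seen.take r, a < x := by
    intro a ha
    obtain ⟨j, hj, hja⟩ := List.getElem_of_mem ha
    simp only [List.length_take, lt_min_iff] at hj
    rw [List.getElem_take] at hja
    exact hja ▸ hlo j hj.2 hj.1
  have hmem_drop : ∀ b ∈ seen.drop r, x ≤ b := by
    intro b hb
    obtain ⟨j, hj, hjb⟩ := List.getElem_of_mem hb
    simp only [List.length_drop] at hj
    rw [List.getElem_drop] at hjb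
    exact hjb ▸ hhi (r + j) (by omega) (by omega)
  rw [List.pairwise_append]
  refine ⟨hs.sublist (List.take_sublist _ _), ?_, ?_⟩
  · rw [List.pairwise_cons]
    exact ⟨hmem_drop, hs.sublist (List.drop_sublist _ _)⟩
  · intro a ha b hb
    rcases List.mem_cons.mp hb with rfl | hb'
    · exact le_of_lt (hmem_take a ha)
    · exact le_trans (le_of_lt (hmem_take a ha)) (hmem_drop b hb')

lemma pvBLoop_eq (k : Int) (rest seen pre : List Int)
    (hs : seen.Pairwise (· ≤ ·)) (hp : seen.Perm pre) :
    pvBLoop k seen rest = pvGo k pre rest := by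
  induction rest generalizing seen pre with
  | nil => rfl
  | cons x xs ih =>
    simp only [pvBLoop, pvGo]
    have hcnt : PySem.List.bisectLeft seen x = pre.countP (fun y => decide (y < x)) := by
      rw [pvBisect_count seen x hs, hp.countP_eq]
    rw [hcnt]
    by_cases hcond : k ≤ ((pre.countP (fun y => decide (y < x))) : Int)
    · simp [hcond]
    · rw [if_neg hcond, if_neg hcond]
      obtain ⟨hle, -, -⟩ := PySem.List.bisectLeft_spec seen x hs
      rw [← hcnt, PySem.List.insert_natCast seen (PySem.List.bisectLeft seen x) x hle]
      apply ih
      · exact pvInsert_sorted seen x hs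
      · refine List.Perm.trans List.perm_middle ?_
        rw [List.take_append_drop]
        exact (hp.cons x).trans (List.perm_append_singleton x pre).symm

-- k = 0 analysis: A's inner check can only fire on the FIRST comparison, so at k = 0
-- A returns the first later element not exceeding the head; B returns the head immediately.
lemma pvAInner_zero_pos (x : Int) (l : List Int) (c : Int) (hc : 0 < c) :
    pvAInner x 0 l c = none := by
  induction l generalizing c with
  | nil => rfl
  | cons y ys ih =>
    simp only [pvAInner]
    by_cases hxy : x > y
    · simp only [hxy, if_pos]
      rw [if_neg (by omega), ih (c + 1) (by omega)]
    · simp only [hxy, if_neg, if_false]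
      rw [if_neg (by omega), ih c hc]

lemma pvAInner_zero (x : Int) (y : Int) (l : List Int) :
    pvAInner x 0 (y :: l) 0 = if x > y then none else some x := by
  simp only [pvAInner]
  by_cases hxy : x > y
  · simp [hxy, pvAInner_zero_pos x l 1 (by omega)]
  · simp [hxy]

lemma pvALoop_zero (h : Int) (t : List Int) (i : Nat) :
    pvALoop (h :: t) 0 (PySem.List.pyRange ((i + 1 : Nat) : Int) (((h :: t).length : Nat) : Int) 1) =
      (t.drop i).find? (fun y => decide (y ≤ h)) := by
  by_cases hi : i < t.length
  · have hlt : ((i + 1 : Nat) : Int) < (((h :: t).length : Nat) : Int) := by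
      simp [List.length_cons]; omega
    rw [PySem.List.pyRange_one_cons hlt]
    have hit : i + 1 < (h :: t).length := by simp; omega
    have hget : (h :: t)[i + 1] = t[i] := by simp
    simp only [pvALoop, PySem.List.pyGet?_natCast, List.getElem?_eq_getElem hit, hget,
      PySem.List.slice_to_natCast]
    have htake : (h :: t).take (i + 1) = h :: t.take i := by simp
    rw [htake, pvAInner_zero]
    have hdrop : t.drop i = t[i] :: t.drop (i + 1) := List.drop_eq_getElem_cons hi
    rw [hdrop, List.find?_cons]
    by_cases hc : t[i] ≤ h
    · simp only [show ¬ (t[i] > h) by omega, if_neg, if_false]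
      simp [hc]
    · simp only [show t[i] > h by omega, if_pos]
      simp only [show (decide (t[i] ≤ h)) = false by simp [hc], cond_false]
      have : ((i + 1 : Nat) : Int) + 1 = ((i + 1 + 1 : Nat) : Int) := by push_cast; ring
      rw [this, pvALoop_zero h t (i + 1)]
  · rw [PySem.List.pyRange_one_eq_nil (by simp [List.length_cons]; omega),
      List.drop_eq_nil_of_le (by omega : t.length ≤ i)]
    rfl
termination_by t.length - i

lemma pvA_zero (h : Int) (t : List Int) :
    first_preceded_by_smaller (h :: t) 0 = t.find? (fun y => decide (y ≤ h)) := by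
  unfold first_preceded_by_smaller
  rw [show (0 : Int) = ((0 : Nat) : Int) by rfl,
    PySem.List.pyRange_one_cons (by simp)]
  have h0 : PySem.List.pyGet? (h :: t) ((0 : Nat) : Int) = some h := by
    simp [PySem.List.pyGet?_natCast]
  simp only [pvALoop, h0, PySem.List.slice_to_natCast, List.take_zero]
  show pvALoop (h :: t) 0 (PySem.List.pyRange (((0 : Nat) : Int) + 1) _ 1) = _
  rw [show ((0 : Nat) : Int) + 1 = ((0 + 1 : Nat) : Int) by norm_num]
  simpa using pvALoop_zero h t 0

lemma pvB_zero (h : Int) (t : List Int) :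
    first_preceded_by_smaller_alt (h :: t) 0 = some h := rfl

-- the agreement condition of D_ characterises 'find? (· ≤ h) returns h itself'
lemma pvFind_iff (h : Int) (t : List Int) :
    (∃ i < t.length, t.getD i 0 = h ∧ ∀ j < i, h < t.getD j 0) ↔
      t.find? (fun y => decide (y ≤ h)) = some h := by
  induction t with
  | nil => simp
  | cons y ys ih =>
    rw [List.find?_cons]
    by_cases hy : y ≤ h
    · simp only [show (decide (y ≤ h)) = true by simp [hy], cond_true]
      constructor
      · rintro ⟨i, hi, hg, hall⟩
        cases i with
        | zero => simpa using hg
        | succ i' =>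
          have := hall 0 (by omega)
          simp at this
          omega
      · intro hsome
        refine ⟨0, by simp, by simpa using hsome, by omega⟩
    · simp only [show (decide (y ≤ h)) = false by simp [hy], cond_false]
      rw [← ih]
      constructor
      · rintro ⟨i, hi, hg, hall⟩
        cases i with
        | zero => simp at hg; omega
        | succ i' =>
          refine ⟨i', by simp at hi; omega, by simpa using hg, ?_⟩
          intro j hj
          have := hall (j + 1) (by omega)
          simpa using this
      · rintro ⟨i, hi, hg, hall⟩
        refine ⟨i + 1, by simp; omega, by simpa using hg, ?_⟩
        intro j hj
        cases j with
        | zero => simpa using by omega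
        | succ j' => simpa using hall j' (by omega)

-- ===== VERDICT (by name: the statement is the Claim_ definition above) =====
theorem first_preceded_by_smaller_spec : Claim_unchanged_first_preceded_by_smaller := by
  intro items k _ hPre hND
  unfold Pre_first_preceded_by_smaller at hPre
  by_cases hk : 0 < k
  · have hknn : ((k.toNat : Nat) : Int) = k := Int.toNat_of_nonneg hPre
    unfold first_preceded_by_smaller first_preceded_by_smaller_alt
    have hA := pvALoop_eq items k hk k.toNat
    rw [hknn] at hA
    rw [hA, ← pvGo_skip items k hk 0 (by omega)]
    simp only [List.take_zero, List.drop_zero]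
    exact (pvBLoop_eq k items [] [] (by simp) (List.Perm.refl [])).symm
  · have hk0 : k = 0 := by omega
    subst hk0
    cases items with
    | nil => rfl
    | cons h t =>
      have hex : ∃ i < (h :: t).tail.length,
          (h :: t).tail.getD i 0 = (h :: t).headI ∧
            ∀ j < i, (h :: t).headI < (h :: t).tail.getD j 0 := by
        by_contra hno
        exact hND ⟨rfl, by simp, hno⟩
      simp only [List.tail_cons, List.headI_cons] at hex
      rw [pvA_zero, pvB_zero, (pvFind_iff h t).mp hex]

theorem first_preceded_by_smaller_tight : Claim_exact_first_preceded_by_smaller := by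
  intro items k _ _ hD
  obtain ⟨hk0, hne, hno⟩ := hD
  subst hk0
  cases items with
  | nil => exact absurd rfl hne
  | cons h t =>
    simp only [List.tail_cons, List.headI_cons] at hno
    rw [pvA_zero, pvB_zero]
    intro heq
    exact hno ((pvFind_iff h t).mpr heq)

theorem first_preceded_by_smaller_changed : Claim_changed_first_preceded_by_smaller := by
  unfold Claim_changed_first_preceded_by_smaller; decide
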